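-- pv_equiv track=rewrite | github.com/rawatpranjal/survey-of-reinforcement-learning-in-economics | archive/ch03_benchmarks/sims/benchmark_gridworld.py | heuristic_manhattan
-- ===== SOURCE A (Python) =====
-- ACTIONS = [(-1, 0), (1, 0), (0, -1), (0, 1), (0, 0)]
--
-- def heuristic_manhattan(state):
--     """Greedy policy: move toward goal (N-1, N-1) via Manhattan distance."""
--     # Get goal distance for each action
--     goal = (4, 4)  # Placeholder, will be overridden in evaluation
--     best_a = 0
--     best_dist = float('inf')
--     for a, (dr, dc) in enumerate(ACTIONS):
--         nr, nc = state[0] + dr, state[1] + dc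
--         dist = abs(nr - goal[0]) + abs(nc - goal[1])
--         if dist < best_dist:
--             best_dist = dist
--             best_a = a
--     return best_a
-- ===== SOURCE B (Python) =====
-- ACTIONS = [(-1, 0), (1, 0), (0, -1), (0, 1), (0, 0)]
--
-- def heuristic_manhattan(state):
--     """Greedy policy toward goal (4,4): closed-form branch on coordinate differences."""
--     r, c = state[0], state[1]
--     if r > 4:
--         return 0
--     elif r < 4:
--         return 1
--     elif c > 4:
--         return 2
--     elif c < 4:
--         return 3
--     else:
--         return 4
-- ===== Notes on version B (the rewrite author's own statement) =====
-- stated objective: simpler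
-- what changed: Replaced the argmin loop over the 5 actions (with an infinity sentinel and strict-< tie-breaking) by a closed-form if/elif branch on the coordinate differences to the hard-coded goal (4,4), reproducing the loop's first-match priority order.
import Mathlib
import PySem

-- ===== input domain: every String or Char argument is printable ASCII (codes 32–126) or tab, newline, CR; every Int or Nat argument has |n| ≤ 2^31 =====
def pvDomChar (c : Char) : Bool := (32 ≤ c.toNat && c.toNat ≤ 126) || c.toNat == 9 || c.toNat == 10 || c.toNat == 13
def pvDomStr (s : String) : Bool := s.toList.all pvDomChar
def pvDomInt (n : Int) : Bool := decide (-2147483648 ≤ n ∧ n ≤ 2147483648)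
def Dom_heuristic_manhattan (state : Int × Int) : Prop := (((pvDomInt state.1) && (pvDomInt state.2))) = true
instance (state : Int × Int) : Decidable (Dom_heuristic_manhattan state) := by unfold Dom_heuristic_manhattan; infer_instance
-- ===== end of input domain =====

-- B replaces A's argmin loop over the 5 actions with a closed-form if/elif branch on the
-- coordinate differences to the hard-coded goal (4,4); objective: simpler.
-- ===== PORT A =====
-- A's module constant ACTIONS and its local constant goal = (4, 4).
def pvACTIONS : List (Int × Int) := [(-1, 0), (1, 0), (0, -1), (0, 1), (0, 0)]
def pvGoal : Int × Int := (4, 4)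

-- A's loop body. best_dist starts at float('inf'); ported as Option Int with
-- none = infinity (the first iteration always replaces it, exactly as in Python).
def pvStep (state : Int × Int) (acc : Int × Option Int) (x : Int × (Int × Int)) : Int × Option Int :=
  let a := x.1
  let dr := x.2.1
  let dc := x.2.2
  let nr := state.1 + dr
  let nc := state.2 + dc
  let dist := |nr - pvGoal.1| + |nc - pvGoal.2|
  match acc.2 with
  | none => (a, some dist)
  | some bd => if dist < bd then (a, some dist) else acc

def heuristic_manhattan (state : Int × Int) : Int :=
  ((PySem.List.enumerate pvACTIONS).foldl (pvStep state) (0, none)).1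

-- ===== PORT B =====
def heuristic_manhattan_alt (state : Int × Int) : Int :=
  if state.1 > 4 then 0
  else if state.1 < 4 then 1
  else if state.2 > 4 then 2
  else if state.2 < 4 then 3
  else 4

-- ===== PRECONDITION & SPEC =====
def Spec_heuristic_manhattan (state : Int × Int) (out : Int) : Prop := out = heuristic_manhattan_alt state
instance (state : Int × Int) (out : Int) : Decidable (Spec_heuristic_manhattan state out) := by unfold Spec_heuristic_manhattan; infer_instance

-- ===== CLAIM (what is proved, stated in full; the proofs are below) =====
def Claim_equal_heuristic_manhattan : Prop := ∀ (state : Int × Int), Dom_heuristic_manhattan state → Spec_heuristic_manhattan state (heuristic_manhattan state)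

-- ===== LEMMAS AND PROOFS =====
-- The fold over the 5 actions is evaluated one step at a time; at each step a
-- by_cases on the comparison "this action's distance < current best" lets the
-- step collapse to a literal accumulator, and each of the 16 leaves is closed
-- by linear arithmetic on |·| rewritten to natAbs.
theorem pv_main (r c : Int) : heuristic_manhattan (r, c) = heuristic_manhattan_alt (r, c) := by
  unfold heuristic_manhattan heuristic_manhattan_alt pvACTIONS
  simp only [PySem.List.enumerate_cons, PySem.List.enumerate_nil, List.foldl]
  rw [(by simp [pvStep, pvGoal] : pvStep (r, c) ((0 : Int), (none : Option Int)) ((0 : Int), ((-1 : Int), (0 : Int))) = ((0 : Int), some (|r + -1 - 4| + |c + 0 - 4|)))]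
  by_cases h1 : |r + 1 - 4| + |c + 0 - 4| < |r + -1 - 4| + |c + 0 - 4|
  · rw [(by simp [pvStep, pvGoal]; all_goals (simp only [Int.abs_eq_natAbs] at h1 ⊢; omega) : pvStep (r, c) ((0 : Int), some (|r + -1 - 4| + |c + 0 - 4|)) (((0 : Int) + 1), ((1 : Int), (0 : Int))) = (((0 : Int) + 1), some (|r + 1 - 4| + |c + 0 - 4|)))]
    by_cases h2 : |r + 0 - 4| + |c + -1 - 4| < |r + 1 - 4| + |c + 0 - 4|
    · rw [(by simp [pvStep, pvGoal]; all_goals (simp only [Int.abs_eq_natAbs] at h2 ⊢; omega) : pvStep (r, c) (((0 : Int) + 1), some (|r + 1 - 4| + |c + 0 - 4|)) (((0 : Int) + 1 + 1), ((0 : Int), (-1 : Int))) = (((0 : Int) + 1 + 1), some (|r + 0 - 4| + |c + -1 - 4|)))]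
      by_cases h3 : |r + 0 - 4| + |c + 1 - 4| < |r + 0 - 4| + |c + -1 - 4|
      · rw [(by simp [pvStep, pvGoal]; all_goals (simp only [Int.abs_eq_natAbs] at h3 ⊢; omega) : pvStep (r, c) (((0 : Int) + 1 + 1), some (|r + 0 - 4| + |c + -1 - 4|)) (((0 : Int) + 1 + 1 + 1), ((0 : Int), (1 : Int))) = (((0 : Int) + 1 + 1 + 1), some (|r + 0 - 4| + |c + 1 - 4|)))]
        by_cases h4 : |r + 0 - 4| + |c + 0 - 4| < |r + 0 - 4| + |c + 1 - 4|
        · rw [(by simp [pvStep, pvGoal]; all_goals (simp only [Int.abs_eq_natAbs] at h4 ⊢; omega) : pvStep (r, c) (((0 : Int) + 1 + 1 + 1), some (|r + 0 - 4| + |c + 1 - 4|)) (((0 : Int) + 1 + 1 + 1 + 1), ((0 : Int), (0 : Int))) = (((0 : Int) + 1 + 1 + 1 + 1), some (|r + 0 - 4| + |c + 0 - 4|)))]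
          show (((0 : Int) + 1 + 1 + 1 + 1) : Int) = if r > 4 then (0:Int) else if r < 4 then 1 else if c > 4 then 2 else if c < 4 then 3 else 4
          simp only [Int.abs_eq_natAbs] at h1 h2 h3 h4
          split_ifs <;> omega
        · rw [(by simp [pvStep, pvGoal]; all_goals (simp only [Int.abs_eq_natAbs] at h4 ⊢; omega) : pvStep (r, c) (((0 : Int) + 1 + 1 + 1), some (|r + 0 - 4| + |c + 1 - 4|)) (((0 : Int) + 1 + 1 + 1 + 1), ((0 : Int), (0 : Int))) = (((0 : Int) + 1 + 1 + 1), some (|r + 0 - 4| + |c + 1 - 4|)))]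
          show (((0 : Int) + 1 + 1 + 1) : Int) = if r > 4 then (0:Int) else if r < 4 then 1 else if c > 4 then 2 else if c < 4 then 3 else 4
          simp only [Int.abs_eq_natAbs] at h1 h2 h3 h4
          split_ifs <;> omega
      · rw [(by simp [pvStep, pvGoal]; all_goals (simp only [Int.abs_eq_natAbs] at h3 ⊢; omega) : pvStep (r, c) (((0 : Int) + 1 + 1), some (|r + 0 - 4| + |c + -1 - 4|)) (((0 : Int) + 1 + 1 + 1), ((0 : Int), (1 : Int))) = (((0 : Int) + 1 + 1), some (|r + 0 - 4| + |c + -1 - 4|)))]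
        by_cases h4 : |r + 0 - 4| + |c + 0 - 4| < |r + 0 - 4| + |c + -1 - 4|
        · rw [(by simp [pvStep, pvGoal]; all_goals (simp only [Int.abs_eq_natAbs] at h4 ⊢; omega) : pvStep (r, c) (((0 : Int) + 1 + 1), some (|r + 0 - 4| + |c + -1 - 4|)) (((0 : Int) + 1 + 1 + 1 + 1), ((0 : Int), (0 : Int))) = (((0 : Int) + 1 + 1 + 1 + 1), some (|r + 0 - 4| + |c + 0 - 4|)))]
          show (((0 : Int) + 1 + 1 + 1 + 1) : Int) = if r > 4 then (0:Int) else if r < 4 then 1 else if c > 4 then 2 else if c < 4 then 3 else 4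
          simp only [Int.abs_eq_natAbs] at h1 h2 h3 h4
          split_ifs <;> omega
        · rw [(by simp [pvStep, pvGoal]; all_goals (simp only [Int.abs_eq_natAbs] at h4 ⊢; omega) : pvStep (r, c) (((0 : Int) + 1 + 1), some (|r + 0 - 4| + |c + -1 - 4|)) (((0 : Int) + 1 + 1 + 1 + 1), ((0 : Int), (0 : Int))) = (((0 : Int) + 1 + 1), some (|r + 0 - 4| + |c + -1 - 4|)))]
          show (((0 : Int) + 1 + 1) : Int) = if r > 4 then (0:Int) else if r < 4 then 1 else if c > 4 then 2 else if c < 4 then 3 else 4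
          simp only [Int.abs_eq_natAbs] at h1 h2 h3 h4
          split_ifs <;> omega
    · rw [(by simp [pvStep, pvGoal]; all_goals (simp only [Int.abs_eq_natAbs] at h2 ⊢; omega) : pvStep (r, c) (((0 : Int) + 1), some (|r + 1 - 4| + |c + 0 - 4|)) (((0 : Int) + 1 + 1), ((0 : Int), (-1 : Int))) = (((0 : Int) + 1), some (|r + 1 - 4| + |c + 0 - 4|)))]
      by_cases h3 : |r + 0 - 4| + |c + 1 - 4| < |r + 1 - 4| + |c + 0 - 4|
      · rw [(by simp [pvStep, pvGoal]; all_goals (simp only [Int.abs_eq_natAbs] at h3 ⊢; omega) : pvStep (r, c) (((0 : Int) + 1), some (|r + 1 - 4| + |c + 0 - 4|)) (((0 : Int) + 1 + 1 + 1), ((0 : Int), (1 : Int))) = (((0 : Int) + 1 + 1 + 1), some (|r + 0 - 4| + |c + 1 - 4|)))]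
        by_cases h4 : |r + 0 - 4| + |c + 0 - 4| < |r + 0 - 4| + |c + 1 - 4|
        · rw [(by simp [pvStep, pvGoal]; all_goals (simp only [Int.abs_eq_natAbs] at h4 ⊢; omega) : pvStep (r, c) (((0 : Int) + 1 + 1 + 1), some (|r + 0 - 4| + |c + 1 - 4|)) (((0 : Int) + 1 + 1 + 1 + 1), ((0 : Int), (0 : Int))) = (((0 : Int) + 1 + 1 + 1 + 1), some (|r + 0 - 4| + |c + 0 - 4|)))]
          show (((0 : Int) + 1 + 1 + 1 + 1) : Int) = if r > 4 then (0:Int) else if r < 4 then 1 else if c > 4 then 2 else if c < 4 then 3 else 4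
          simp only [Int.abs_eq_natAbs] at h1 h2 h3 h4
          split_ifs <;> omega
        · rw [(by simp [pvStep, pvGoal]; all_goals (simp only [Int.abs_eq_natAbs] at h4 ⊢; omega) : pvStep (r, c) (((0 : Int) + 1 + 1 + 1), some (|r + 0 - 4| + |c + 1 - 4|)) (((0 : Int) + 1 + 1 + 1 + 1), ((0 : Int), (0 : Int))) = (((0 : Int) + 1 + 1 + 1), some (|r + 0 - 4| + |c + 1 - 4|)))]
          show (((0 : Int) + 1 + 1 + 1) : Int) = if r > 4 then (0:Int) else if r < 4 then 1 else if c > 4 then 2 else if c < 4 then 3 else 4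
          simp only [Int.abs_eq_natAbs] at h1 h2 h3 h4
          split_ifs <;> omega
      · rw [(by simp [pvStep, pvGoal]; all_goals (simp only [Int.abs_eq_natAbs] at h3 ⊢; omega) : pvStep (r, c) (((0 : Int) + 1), some (|r + 1 - 4| + |c + 0 - 4|)) (((0 : Int) + 1 + 1 + 1), ((0 : Int), (1 : Int))) = (((0 : Int) + 1), some (|r + 1 - 4| + |c + 0 - 4|)))]
        by_cases h4 : |r + 0 - 4| + |c + 0 - 4| < |r + 1 - 4| + |c + 0 - 4|
        · rw [(by simp [pvStep, pvGoal]; all_goals (simp only [Int.abs_eq_natAbs] at h4 ⊢; omega) : pvStep (r, c) (((0 : Int) + 1), some (|r + 1 - 4| + |c + 0 - 4|)) (((0 : Int) + 1 + 1 + 1 + 1), ((0 : Int), (0 : Int))) = (((0 : Int) + 1 + 1 + 1 + 1), some (|r + 0 - 4| + |c + 0 - 4|)))]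
          show (((0 : Int) + 1 + 1 + 1 + 1) : Int) = if r > 4 then (0:Int) else if r < 4 then 1 else if c > 4 then 2 else if c < 4 then 3 else 4
          simp only [Int.abs_eq_natAbs] at h1 h2 h3 h4
          split_ifs <;> omega
        · rw [(by simp [pvStep, pvGoal]; all_goals (simp only [Int.abs_eq_natAbs] at h4 ⊢; omega) : pvStep (r, c) (((0 : Int) + 1), some (|r + 1 - 4| + |c + 0 - 4|)) (((0 : Int) + 1 + 1 + 1 + 1), ((0 : Int), (0 : Int))) = (((0 : Int) + 1), some (|r + 1 - 4| + |c + 0 - 4|)))]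
          show (((0 : Int) + 1) : Int) = if r > 4 then (0:Int) else if r < 4 then 1 else if c > 4 then 2 else if c < 4 then 3 else 4
          simp only [Int.abs_eq_natAbs] at h1 h2 h3 h4
          split_ifs <;> omega
  · rw [(by simp [pvStep, pvGoal]; all_goals (simp only [Int.abs_eq_natAbs] at h1 ⊢; omega) : pvStep (r, c) ((0 : Int), some (|r + -1 - 4| + |c + 0 - 4|)) (((0 : Int) + 1), ((1 : Int), (0 : Int))) = ((0 : Int), some (|r + -1 - 4| + |c + 0 - 4|)))]
    by_cases h2 : |r + 0 - 4| + |c + -1 - 4| < |r + -1 - 4| + |c + 0 - 4|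
    · rw [(by simp [pvStep, pvGoal]; all_goals (simp only [Int.abs_eq_natAbs] at h2 ⊢; omega) : pvStep (r, c) ((0 : Int), some (|r + -1 - 4| + |c + 0 - 4|)) (((0 : Int) + 1 + 1), ((0 : Int), (-1 : Int))) = (((0 : Int) + 1 + 1), some (|r + 0 - 4| + |c + -1 - 4|)))]
      by_cases h3 : |r + 0 - 4| + |c + 1 - 4| < |r + 0 - 4| + |c + -1 - 4|
      · rw [(by simp [pvStep, pvGoal]; all_goals (simp only [Int.abs_eq_natAbs] at h3 ⊢; omega) : pvStep (r, c) (((0 : Int) + 1 + 1), some (|r + 0 - 4| + |c + -1 - 4|)) (((0 : Int) + 1 + 1 + 1), ((0 : Int), (1 : Int))) = (((0 : Int) + 1 + 1 + 1), some (|r + 0 - 4| + |c + 1 - 4|)))]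
        by_cases h4 : |r + 0 - 4| + |c + 0 - 4| < |r + 0 - 4| + |c + 1 - 4|
        · rw [(by simp [pvStep, pvGoal]; all_goals (simp only [Int.abs_eq_natAbs] at h4 ⊢; omega) : pvStep (r, c) (((0 : Int) + 1 + 1 + 1), some (|r + 0 - 4| + |c + 1 - 4|)) (((0 : Int) + 1 + 1 + 1 + 1), ((0 : Int), (0 : Int))) = (((0 : Int) + 1 + 1 + 1 + 1), some (|r + 0 - 4| + |c + 0 - 4|)))]
          show (((0 : Int) + 1 + 1 + 1 + 1) : Int) = if r > 4 then (0:Int) else if r < 4 then 1 else if c > 4 then 2 else if c < 4 then 3 else 4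
          simp only [Int.abs_eq_natAbs] at h1 h2 h3 h4
          split_ifs <;> omega
        · rw [(by simp [pvStep, pvGoal]; all_goals (simp only [Int.abs_eq_natAbs] at h4 ⊢; omega) : pvStep (r, c) (((0 : Int) + 1 + 1 + 1), some (|r + 0 - 4| + |c + 1 - 4|)) (((0 : Int) + 1 + 1 + 1 + 1), ((0 : Int), (0 : Int))) = (((0 : Int) + 1 + 1 + 1), some (|r + 0 - 4| + |c + 1 - 4|)))]
          show (((0 : Int) + 1 + 1 + 1) : Int) = if r > 4 then (0:Int) else if r < 4 then 1 else if c > 4 then 2 else if c < 4 then 3 else 4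
          simp only [Int.abs_eq_natAbs] at h1 h2 h3 h4
          split_ifs <;> omega
      · rw [(by simp [pvStep, pvGoal]; all_goals (simp only [Int.abs_eq_natAbs] at h3 ⊢; omega) : pvStep (r, c) (((0 : Int) + 1 + 1), some (|r + 0 - 4| + |c + -1 - 4|)) (((0 : Int) + 1 + 1 + 1), ((0 : Int), (1 : Int))) = (((0 : Int) + 1 + 1), some (|r + 0 - 4| + |c + -1 - 4|)))]
        by_cases h4 : |r + 0 - 4| + |c + 0 - 4| < |r + 0 - 4| + |c + -1 - 4|
        · rw [(by simp [pvStep, pvGoal]; all_goals (simp only [Int.abs_eq_natAbs] at h4 ⊢; omega) : pvStep (r, c) (((0 : Int) + 1 + 1), some (|r + 0 - 4| + |c + -1 - 4|)) (((0 : Int) + 1 + 1 + 1 + 1), ((0 : Int), (0 : Int))) = (((0 : Int) + 1 + 1 + 1 + 1), some (|r + 0 - 4| + |c + 0 - 4|)))]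
          show (((0 : Int) + 1 + 1 + 1 + 1) : Int) = if r > 4 then (0:Int) else if r < 4 then 1 else if c > 4 then 2 else if c < 4 then 3 else 4
          simp only [Int.abs_eq_natAbs] at h1 h2 h3 h4
          split_ifs <;> omega
        · rw [(by simp [pvStep, pvGoal]; all_goals (simp only [Int.abs_eq_natAbs] at h4 ⊢; omega) : pvStep (r, c) (((0 : Int) + 1 + 1), some (|r + 0 - 4| + |c + -1 - 4|)) (((0 : Int) + 1 + 1 + 1 + 1), ((0 : Int), (0 : Int))) = (((0 : Int) + 1 + 1), some (|r + 0 - 4| + |c + -1 - 4|)))]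
          show (((0 : Int) + 1 + 1) : Int) = if r > 4 then (0:Int) else if r < 4 then 1 else if c > 4 then 2 else if c < 4 then 3 else 4
          simp only [Int.abs_eq_natAbs] at h1 h2 h3 h4
          split_ifs <;> omega
    · rw [(by simp [pvStep, pvGoal]; all_goals (simp only [Int.abs_eq_natAbs] at h2 ⊢; omega) : pvStep (r, c) ((0 : Int), some (|r + -1 - 4| + |c + 0 - 4|)) (((0 : Int) + 1 + 1), ((0 : Int), (-1 : Int))) = ((0 : Int), some (|r + -1 - 4| + |c + 0 - 4|)))]
      by_cases h3 : |r + 0 - 4| + |c + 1 - 4| < |r + -1 - 4| + |c + 0 - 4|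
      · rw [(by simp [pvStep, pvGoal]; all_goals (simp only [Int.abs_eq_natAbs] at h3 ⊢; omega) : pvStep (r, c) ((0 : Int), some (|r + -1 - 4| + |c + 0 - 4|)) (((0 : Int) + 1 + 1 + 1), ((0 : Int), (1 : Int))) = (((0 : Int) + 1 + 1 + 1), some (|r + 0 - 4| + |c + 1 - 4|)))]
        by_cases h4 : |r + 0 - 4| + |c + 0 - 4| < |r + 0 - 4| + |c + 1 - 4|
        · rw [(by simp [pvStep, pvGoal]; all_goals (simp only [Int.abs_eq_natAbs] at h4 ⊢; omega) : pvStep (r, c) (((0 : Int) + 1 + 1 + 1), some (|r + 0 - 4| + |c + 1 - 4|)) (((0 : Int) + 1 + 1 + 1 + 1), ((0 : Int), (0 : Int))) = (((0 : Int) + 1 + 1 + 1 + 1), some (|r + 0 - 4| + |c + 0 - 4|)))]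
          show (((0 : Int) + 1 + 1 + 1 + 1) : Int) = if r > 4 then (0:Int) else if r < 4 then 1 else if c > 4 then 2 else if c < 4 then 3 else 4
          simp only [Int.abs_eq_natAbs] at h1 h2 h3 h4
          split_ifs <;> omega
        · rw [(by simp [pvStep, pvGoal]; all_goals (simp only [Int.abs_eq_natAbs] at h4 ⊢; omega) : pvStep (r, c) (((0 : Int) + 1 + 1 + 1), some (|r + 0 - 4| + |c + 1 - 4|)) (((0 : Int) + 1 + 1 + 1 + 1), ((0 : Int), (0 : Int))) = (((0 : Int) + 1 + 1 + 1), some (|r + 0 - 4| + |c + 1 - 4|)))]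
          show (((0 : Int) + 1 + 1 + 1) : Int) = if r > 4 then (0:Int) else if r < 4 then 1 else if c > 4 then 2 else if c < 4 then 3 else 4
          simp only [Int.abs_eq_natAbs] at h1 h2 h3 h4
          split_ifs <;> omega
      · rw [(by simp [pvStep, pvGoal]; all_goals (simp only [Int.abs_eq_natAbs] at h3 ⊢; omega) : pvStep (r, c) ((0 : Int), some (|r + -1 - 4| + |c + 0 - 4|)) (((0 : Int) + 1 + 1 + 1), ((0 : Int), (1 : Int))) = ((0 : Int), some (|r + -1 - 4| + |c + 0 - 4|)))]
        by_cases h4 : |r + 0 - 4| + |c + 0 - 4| < |r + -1 - 4| + |c + 0 - 4|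
        · rw [(by simp [pvStep, pvGoal]; all_goals (simp only [Int.abs_eq_natAbs] at h4 ⊢; omega) : pvStep (r, c) ((0 : Int), some (|r + -1 - 4| + |c + 0 - 4|)) (((0 : Int) + 1 + 1 + 1 + 1), ((0 : Int), (0 : Int))) = (((0 : Int) + 1 + 1 + 1 + 1), some (|r + 0 - 4| + |c + 0 - 4|)))]
          show (((0 : Int) + 1 + 1 + 1 + 1) : Int) = if r > 4 then (0:Int) else if r < 4 then 1 else if c > 4 then 2 else if c < 4 then 3 else 4
          simp only [Int.abs_eq_natAbs] at h1 h2 h3 h4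
          split_ifs <;> omega
        · rw [(by simp [pvStep, pvGoal]; all_goals (simp only [Int.abs_eq_natAbs] at h4 ⊢; omega) : pvStep (r, c) ((0 : Int), some (|r + -1 - 4| + |c + 0 - 4|)) (((0 : Int) + 1 + 1 + 1 + 1), ((0 : Int), (0 : Int))) = ((0 : Int), some (|r + -1 - 4| + |c + 0 - 4|)))]
          show ((0 : Int) : Int) = if r > 4 then (0:Int) else if r < 4 then 1 else if c > 4 then 2 else if c < 4 then 3 else 4
          simp only [Int.abs_eq_natAbs] at h1 h2 h3 h4
          split_ifs <;> omega

-- ===== VERDICT (by name: the statement is the Claim_ definition above) =====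
theorem heuristic_manhattan_spec : Claim_equal_heuristic_manhattan := by
  intro state _
  obtain ⟨r, c⟩ := state
  unfold Spec_heuristic_manhattan
  exact pv_main r c
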